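-- pv_equiv track=rewrite | github.com/MarioRefoyo/Multi-SpaCE | dashboards/cf_dashboard.py | default_pareto_axes
-- ===== SOURCE A (Python) =====
-- def default_pareto_axes(numeric_cols: list[str]) -> tuple[str, str, str]:
--     preferred = [
--         "sparsity",
--         "subsequences",
--         "subsequences %",
--         "AE_OS",
--         "AE_IOS",
--         "proximity",
--         "L2",
--         "L1",
--         "NoS",
--         "contiguity",
--         "validity",
--         "times",
--     ]
--     chosen = [col for col in preferred if col in numeric_cols]
--     chosen.extend(col for col in numeric_cols if col not in chosen)
--     return chosen[0], chosen[1], chosen[2]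
-- ===== SOURCE B (Python) =====
-- def default_pareto_axes(numeric_cols: list[str]) -> tuple[str, str, str]:
--     preferred = [
--         "sparsity",
--         "subsequences",
--         "subsequences %",
--         "AE_OS",
--         "AE_IOS",
--         "proximity",
--         "L2",
--         "L1",
--         "NoS",
--         "contiguity",
--         "validity",
--         "times",
--     ]
--     rank = {col: i for i, col in enumerate(preferred)}
--     n = len(preferred)
--     buckets = [[] for _ in range(n + 1)]
--     for col in dict.fromkeys(numeric_cols):
--         buckets[rank.get(col, n)].append(col)
--     chosen = [col for bucket in buckets for col in bucket]
--     return chosen[0], chosen[1], chosen[2]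
-- ===== Notes on version B (the rewrite author's own statement) =====
-- stated objective: faster
-- what changed: Replaces A's two membership-scanning comprehension passes (preferred-filter with 'col in numeric_cols' list scans, then an extend with 'col not in chosen' scans over the growing list) by a one-pass counting-sort-style distribution of the deduplicated columns into rank buckets keyed by a precomputed rank dict, then concatenating the buckets.
import Mathlib
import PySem

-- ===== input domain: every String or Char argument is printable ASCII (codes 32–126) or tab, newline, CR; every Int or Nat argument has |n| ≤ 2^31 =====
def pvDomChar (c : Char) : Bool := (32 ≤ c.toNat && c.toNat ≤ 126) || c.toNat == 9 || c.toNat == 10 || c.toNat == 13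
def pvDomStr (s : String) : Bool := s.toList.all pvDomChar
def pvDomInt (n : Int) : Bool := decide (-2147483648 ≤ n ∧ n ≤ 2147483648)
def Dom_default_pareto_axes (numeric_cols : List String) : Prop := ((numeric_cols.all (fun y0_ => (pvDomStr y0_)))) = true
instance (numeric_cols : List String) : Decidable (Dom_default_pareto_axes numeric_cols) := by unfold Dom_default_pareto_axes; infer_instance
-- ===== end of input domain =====

-- B replaces A's two membership-scanning passes by a one-pass bucket (counting-sort style) distribution of the
-- deduplicated columns, keyed by a precomputed rank dict; same return value, O(n) instead of repeated list scans.

-- the 'preferred' literal both Pythons begin with (shared constant used by both ports)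
def pvPreferred : List String := ["sparsity", "subsequences", "subsequences %", "AE_OS", "AE_IOS", "proximity", "L2", "L1", "NoS", "contiguity", "validity", "times"]

-- ===== PORT A =====
-- Python A: chosen = [col for col in preferred if col in numeric_cols]; chosen.extend(col for col in numeric_cols
-- if col not in chosen)  (the generator sees the growing list, so duplicates are skipped); then chosen[0..2].
-- chosen[i] raises IndexError when chosen is shorter: pyGet? is none exactly there (excluded by Pre_); getD "" is unreachable inside Pre_.
def default_pareto_axes (numeric_cols : List String) : String × String × String :=
  let chosen1 := pvPreferred.filter (fun col => numeric_cols.contains col)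
  let chosen := numeric_cols.foldl (fun acc col => if acc.contains col then acc else acc ++ [col]) chosen1
  ((PySem.List.pyGet? chosen 0).getD "", (PySem.List.pyGet? chosen 1).getD "", (PySem.List.pyGet? chosen 2).getD "")

-- ===== PORT B =====
-- rank = {col: i for i, col in enumerate(preferred)}
def pvRankB : PySem.Dict String Int :=
  PySem.Dict.ofList ((PySem.List.enumerate pvPreferred 0).map (fun p => (p.2, p.1)))

-- Python B: buckets = [[] for _ in range(n+1)]; for col in dict.fromkeys(numeric_cols):
-- buckets[rank.get(col, n)].append(col); chosen = [col for bucket in buckets for col in bucket]; chosen[0..2].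
-- The bucket index rank.get(col, n) is always in 0..n (rank values are nonneg), so .toNat is exact here.
def default_pareto_axes_alt (numeric_cols : List String) : String × String × String :=
  let n := pvPreferred.length
  let buckets := (PySem.List.dedup numeric_cols).foldl
      (fun bs col =>
        let r := (PySem.Dict.getD pvRankB col (n : Int)).toNat
        bs.set r (bs.getD r [] ++ [col]))
      (List.replicate (n + 1) ([] : List String))
  let chosen := buckets.flatten
  ((PySem.List.pyGet? chosen 0).getD "", (PySem.List.pyGet? chosen 1).getD "", (PySem.List.pyGet? chosen 2).getD "")

-- ===== PRECONDITION & SPEC =====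
-- Pre_ excludes exactly the inputs with fewer than 3 distinct columns, where Python A (and Python B) raise IndexError.
def Pre_default_pareto_axes (numeric_cols : List String) : Prop :=
  3 ≤ (PySem.List.dedup numeric_cols).length
instance (numeric_cols : List String) : Decidable (Pre_default_pareto_axes numeric_cols) := by
  unfold Pre_default_pareto_axes; infer_instance

def pvWitness_default_pareto_axes : List String := ["sparsity", "foo", "L1", "foo"]

def Spec_default_pareto_axes (numeric_cols : List String) (out : String × String × String) : Prop := out = default_pareto_axes_alt numeric_cols
instance (numeric_cols : List String) (out : String × String × String) : Decidable (Spec_default_pareto_axes numeric_cols out) := by unfold Spec_default_pareto_axes; infer_instance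

-- ===== CLAIM (what is proved, stated in full; the proofs are below) =====
def Claim_equal_default_pareto_axes : Prop := ∀ (numeric_cols : List String), Dom_default_pareto_axes numeric_cols → Pre_default_pareto_axes numeric_cols → Spec_default_pareto_axes numeric_cols (default_pareto_axes numeric_cols)

-- ===== LEMMAS AND PROOFS =====

-- first-occurrence dedup of l, skipping anything already in acc (proof skeleton for both folds)
def pvNew (acc : List String) : List String → List String
  | [] => []
  | c :: r => if acc.contains c then pvNew acc r else c :: pvNew (acc ++ [c]) r

theorem pv_foldl_extend (l : List String) : ∀ (acc : List String),
    l.foldl (fun acc col => if acc.contains col then acc else acc ++ [col]) acc = acc ++ pvNew acc l := by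
  induction l with
  | nil => intro acc; simp [pvNew]
  | cons c r ih =>
    intro acc
    rw [List.foldl_cons]
    by_cases h : c ∈ acc
    · rw [if_pos (by simpa using h), ih acc]
      simp [pvNew, h]
    · rw [if_neg (by simpa using h), ih (acc ++ [c])]
      simp [pvNew, h, List.append_assoc]

theorem pv_mem_pvNew : ∀ (l acc : List String) (x : String), x ∈ pvNew acc l → x ∈ l := by
  intro l
  induction l with
  | nil => intro acc x h; simp [pvNew] at h
  | cons c r ih =>
    intro acc x h
    by_cases hc : c ∈ acc
    · simp [pvNew, hc] at h
      exact List.mem_cons_of_mem _ (ih _ _ h)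
    · simp [pvNew, hc] at h
      rcases h with h | h
      · simp [h]
      · exact List.mem_cons_of_mem _ (ih _ _ h)

theorem pvNew_congr : ∀ (l acc acc' : List String), (∀ x, x ∈ acc ↔ x ∈ acc') →
    pvNew acc l = pvNew acc' l := by
  intro l
  induction l with
  | nil => intro acc acc' _; simp [pvNew]
  | cons c r ih =>
    intro acc acc' h
    by_cases hc : c ∈ acc
    · have hc' : c ∈ acc' := (h c).1 hc
      simp [pvNew, hc, hc', ih acc acc' h]
    · have hc' : c ∉ acc' := fun hx => hc ((h c).2 hx)
      have hext : ∀ x, x ∈ acc ++ [c] ↔ x ∈ acc' ++ [c] := by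
        intro x; simp [h x]
      simp [pvNew, hc, hc', ih (acc ++ [c]) (acc' ++ [c]) hext]

theorem pvNew_append : ∀ (l a b : List String),
    pvNew (a ++ b) l = (pvNew b l).filter (fun c => !(a.contains c)) := by
  intro l
  induction l with
  | nil => intro a b; simp [pvNew]
  | cons c r ih =>
    intro a b
    simp only [pvNew]
    by_cases hb : c ∈ b
    · have hab : (a ++ b).contains c = true := by simp [hb]
      rw [if_pos hab, if_pos (by simpa using hb), ih a b]
    · by_cases ha : c ∈ a
      · have hab : (a ++ b).contains c = true := by simp [ha]
        have hmem : ∀ x, x ∈ a ++ b ↔ x ∈ a ++ (b ++ [c]) := by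
          intro x
          simp
          constructor
          · rintro (hx | hx) <;> simp [hx]
          · rintro (hx | hx | hx)
            · exact Or.inl hx
            · exact Or.inr hx
            · exact Or.inl (hx ▸ ha)
        rw [if_pos hab, if_neg (by simpa using hb), List.filter_cons]
        have hfc : ¬ ((!a.contains c) = true) := by simp [ha]
        rw [if_neg hfc]
        rw [pvNew_congr r (a ++ b) (a ++ (b ++ [c])) hmem]
        exact ih a (b ++ [c])
      · have hab : ¬ ((a ++ b).contains c = true) := by simp [ha, hb]
        rw [if_neg hab, if_neg (by simpa using hb), List.filter_cons]
        have hfc : (!a.contains c) = true := by simp [ha]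
        rw [if_pos hfc, List.append_assoc]
        exact congrArg (c :: ·) (ih a (b ++ [c]))

theorem pv_dedup_eq (l : List String) : PySem.List.dedup l = pvNew [] l := by
  have hadd : PySem.Set.add = (fun (acc : List String) (col : String) =>
      if acc.contains col then acc else acc ++ [col]) := by
    funext s c
    unfold PySem.Set.add
    rfl
  have h1 : PySem.List.dedup l = List.foldl PySem.Set.add [] l := by
    simp [PySem.List.dedup, PySem.Set.ofList]
  rw [h1, hadd, pv_foldl_extend]
  simp

theorem pv_filter_singleton : ∀ (l : List String), l.Nodup → ∀ (s : String),
    l.filter (fun c => c == s) = if s ∈ l then [s] else [] := by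
  intro l
  induction l with
  | nil => intro _ s; simp
  | cons a t ih =>
    intro hnd s
    simp at hnd
    by_cases h : a = s
    · subst h
      have : t.filter (fun c => c == a) = [] := by
        apply List.filter_eq_nil_iff.2
        intro x hx
        simp
        intro hxa; exact hnd.1 (hxa ▸ hx)
      simp [List.filter_cons, this]
    · simp [List.filter_cons, h, ih hnd.2 s]
      have hs : ¬ s = a := fun e => h e.symm
      simp [hs]

theorem pv_filter_flatten (P : String → Bool) : ∀ (l : List String),
    l.filter P = (l.map (fun p => if P p then [p] else [])).flatten := by
  intro l
  induction l with
  | nil => simp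
  | cons a t ih =>
    by_cases h : P a <;> simp [List.filter_cons, h, ih]

theorem pv_rank_not_mem (c : String) (h : c ∉ pvPreferred) :
    PySem.Dict.getD pvRankB c (pvPreferred.length : Int) = 12 := by
  simp [pvPreferred] at h
  obtain ⟨h0, h1, h2, h3, h4, h5, h6, h7, h8, h9, h10, h11⟩ := h
  have e0 : (("sparsity" : String) == c) = false := beq_eq_false_iff_ne.mpr (Ne.symm h0)
  have e1 : (("subsequences" : String) == c) = false := beq_eq_false_iff_ne.mpr (Ne.symm h1)
  have e2 : (("subsequences %" : String) == c) = false := beq_eq_false_iff_ne.mpr (Ne.symm h2)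
  have e3 : (("AE_OS" : String) == c) = false := beq_eq_false_iff_ne.mpr (Ne.symm h3)
  have e4 : (("AE_IOS" : String) == c) = false := beq_eq_false_iff_ne.mpr (Ne.symm h4)
  have e5 : (("proximity" : String) == c) = false := beq_eq_false_iff_ne.mpr (Ne.symm h5)
  have e6 : (("L2" : String) == c) = false := beq_eq_false_iff_ne.mpr (Ne.symm h6)
  have e7 : (("L1" : String) == c) = false := beq_eq_false_iff_ne.mpr (Ne.symm h7)
  have e8 : (("NoS" : String) == c) = false := beq_eq_false_iff_ne.mpr (Ne.symm h8)
  have e9 : (("contiguity" : String) == c) = false := beq_eq_false_iff_ne.mpr (Ne.symm h9)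
  have e10 : (("validity" : String) == c) = false := beq_eq_false_iff_ne.mpr (Ne.symm h10)
  have e11 : (("times" : String) == c) = false := beq_eq_false_iff_ne.mpr (Ne.symm h11)
  simp [e0, e1, e2, e3, e4, e5, e6, e7, e8, e9, e10, e11, pvRankB, pvPreferred, PySem.Dict.getD, PySem.Dict.get?, PySem.Dict.ofList,
        PySem.Dict.update, PySem.Dict.insert, PySem.Dict.empty, PySem.Dict.items,
        PySem.Dict.contains, PySem.List.enumerate, List.find?,
        h0, h1, h2, h3, h4, h5, h6, h7, h8, h9, h10, h11]

theorem pv_foldB (d : List String) : ∀ (u0 u1 u2 u3 u4 u5 u6 u7 u8 u9 u10 u11 u12 : List String),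
    d.foldl
      (fun bs col =>
        let r := (PySem.Dict.getD pvRankB col (pvPreferred.length : Int)).toNat
        bs.set r (bs.getD r [] ++ [col]))
      [u0, u1, u2, u3, u4, u5, u6, u7, u8, u9, u10, u11, u12] = [u0 ++ d.filter (fun c => c == "sparsity"), u1 ++ d.filter (fun c => c == "subsequences"), u2 ++ d.filter (fun c => c == "subsequences %"), u3 ++ d.filter (fun c => c == "AE_OS"), u4 ++ d.filter (fun c => c == "AE_IOS"), u5 ++ d.filter (fun c => c == "proximity"), u6 ++ d.filter (fun c => c == "L2"), u7 ++ d.filter (fun c => c == "L1"), u8 ++ d.filter (fun c => c == "NoS"), u9 ++ d.filter (fun c => c == "contiguity"), u10 ++ d.filter (fun c => c == "validity"), u11 ++ d.filter (fun c => c == "times"), u12 ++ d.filter (fun c => !(pvPreferred.contains c))] := by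
  induction d with
  | nil => intro u0 u1 u2 u3 u4 u5 u6 u7 u8 u9 u10 u11 u12; simp
  | cons c r ih =>
    intro u0 u1 u2 u3 u4 u5 u6 u7 u8 u9 u10 u11 u12
    rw [List.foldl_cons]
    by_cases h0 : c = "sparsity"
    · subst h0
      refine Eq.trans (ih (u0 ++ ["sparsity"]) u1 u2 u3 u4 u5 u6 u7 u8 u9 u10 u11 u12) ?_
      simp [List.filter_cons, List.append_assoc, pvPreferred]
    by_cases h1 : c = "subsequences"
    · subst h1
      refine Eq.trans (ih u0 (u1 ++ ["subsequences"]) u2 u3 u4 u5 u6 u7 u8 u9 u10 u11 u12) ?_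
      simp [List.filter_cons, List.append_assoc, pvPreferred]
    by_cases h2 : c = "subsequences %"
    · subst h2
      refine Eq.trans (ih u0 u1 (u2 ++ ["subsequences %"]) u3 u4 u5 u6 u7 u8 u9 u10 u11 u12) ?_
      simp [List.filter_cons, List.append_assoc, pvPreferred]
    by_cases h3 : c = "AE_OS"
    · subst h3
      refine Eq.trans (ih u0 u1 u2 (u3 ++ ["AE_OS"]) u4 u5 u6 u7 u8 u9 u10 u11 u12) ?_
      simp [List.filter_cons, List.append_assoc, pvPreferred]
    by_cases h4 : c = "AE_IOS"
    · subst h4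
      refine Eq.trans (ih u0 u1 u2 u3 (u4 ++ ["AE_IOS"]) u5 u6 u7 u8 u9 u10 u11 u12) ?_
      simp [List.filter_cons, List.append_assoc, pvPreferred]
    by_cases h5 : c = "proximity"
    · subst h5
      refine Eq.trans (ih u0 u1 u2 u3 u4 (u5 ++ ["proximity"]) u6 u7 u8 u9 u10 u11 u12) ?_
      simp [List.filter_cons, List.append_assoc, pvPreferred]
    by_cases h6 : c = "L2"
    · subst h6
      refine Eq.trans (ih u0 u1 u2 u3 u4 u5 (u6 ++ ["L2"]) u7 u8 u9 u10 u11 u12) ?_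
      simp [List.filter_cons, List.append_assoc, pvPreferred]
    by_cases h7 : c = "L1"
    · subst h7
      refine Eq.trans (ih u0 u1 u2 u3 u4 u5 u6 (u7 ++ ["L1"]) u8 u9 u10 u11 u12) ?_
      simp [List.filter_cons, List.append_assoc, pvPreferred]
    by_cases h8 : c = "NoS"
    · subst h8
      refine Eq.trans (ih u0 u1 u2 u3 u4 u5 u6 u7 (u8 ++ ["NoS"]) u9 u10 u11 u12) ?_
      simp [List.filter_cons, List.append_assoc, pvPreferred]
    by_cases h9 : c = "contiguity"
    · subst h9
      refine Eq.trans (ih u0 u1 u2 u3 u4 u5 u6 u7 u8 (u9 ++ ["contiguity"]) u10 u11 u12) ?_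
      simp [List.filter_cons, List.append_assoc, pvPreferred]
    by_cases h10 : c = "validity"
    · subst h10
      refine Eq.trans (ih u0 u1 u2 u3 u4 u5 u6 u7 u8 u9 (u10 ++ ["validity"]) u11 u12) ?_
      simp [List.filter_cons, List.append_assoc, pvPreferred]
    by_cases h11 : c = "times"
    · subst h11
      refine Eq.trans (ih u0 u1 u2 u3 u4 u5 u6 u7 u8 u9 u10 (u11 ++ ["times"]) u12) ?_
      simp [List.filter_cons, List.append_assoc, pvPreferred]
    · have hcm : c ∉ pvPreferred := by simp [pvPreferred, h0, h1, h2, h3, h4, h5, h6, h7, h8, h9, h10, h11]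
      have hk : PySem.Dict.getD pvRankB c (pvPreferred.length : Int) = 12 := pv_rank_not_mem c hcm
      have hf : (fun (bs : List (List String)) col =>
          let r := (PySem.Dict.getD pvRankB col (pvPreferred.length : Int)).toNat
          bs.set r (bs.getD r [] ++ [col])) [u0, u1, u2, u3, u4, u5, u6, u7, u8, u9, u10, u11, u12] c = [u0, u1, u2, u3, u4, u5, u6, u7, u8, u9, u10, u11, u12 ++ [c]] := by
        simp [hk]
      refine Eq.trans (congrArg (fun bs0 => List.foldl
          (fun bs col =>
            let r := (PySem.Dict.getD pvRankB col (pvPreferred.length : Int)).toNat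
            bs.set r (bs.getD r [] ++ [col])) bs0 r) hf) ?_
      refine Eq.trans (ih u0 u1 u2 u3 u4 u5 u6 u7 u8 u9 u10 u11 (u12 ++ [c])) ?_
      have hnc : pvPreferred.contains c = false := by
        simp [pvPreferred, h0, h1, h2, h3, h4, h5, h6, h7, h8, h9, h10, h11]
      simp [List.filter_cons, h0, h1, h2, h3, h4, h5, h6, h7, h8, h9, h10, h11, hnc, hcm, List.append_assoc]

theorem default_pareto_axes_eq_lists (numeric_cols : List String) :
    default_pareto_axes numeric_cols = default_pareto_axes_alt numeric_cols := by
  have hnodup : (PySem.List.dedup numeric_cols).Nodup := by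
    simpa using PySem.List.nodup_dedup (l := numeric_cols)
  have hcong : ∀ x ∈ pvNew [] numeric_cols,
      (!(pvPreferred.filter (fun col => numeric_cols.contains col)).contains x) =
      (!pvPreferred.contains x) := by
    intro x hx
    have hxnc : x ∈ numeric_cols := pv_mem_pvNew numeric_cols [] x hx
    simp [List.mem_filter, hxnc, pvPreferred, pvPreferred]
  have hkey : numeric_cols.foldl (fun acc col => if acc.contains col then acc else acc ++ [col])
      (pvPreferred.filter (fun col => numeric_cols.contains col)) =
      ((PySem.List.dedup numeric_cols).foldl
        (fun bs col =>
          let r := (PySem.Dict.getD pvRankB col (pvPreferred.length : Int)).toNat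
          bs.set r (bs.getD r [] ++ [col]))
        (List.replicate (pvPreferred.length + 1) ([] : List String))).flatten := by
    rw [pv_foldl_extend]
    have h13 : List.replicate (pvPreferred.length + 1) ([] : List String) =
        [[], [], [], [], [], [], [], [], [], [], [], [], []] := rfl
    rw [h13, pv_foldB (PySem.List.dedup numeric_cols)]
    rw [pv_filter_singleton _ hnodup "sparsity"]
    rw [pv_filter_singleton _ hnodup "subsequences"]
    rw [pv_filter_singleton _ hnodup "subsequences %"]
    rw [pv_filter_singleton _ hnodup "AE_OS"]
    rw [pv_filter_singleton _ hnodup "AE_IOS"]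
    rw [pv_filter_singleton _ hnodup "proximity"]
    rw [pv_filter_singleton _ hnodup "L2"]
    rw [pv_filter_singleton _ hnodup "L1"]
    rw [pv_filter_singleton _ hnodup "NoS"]
    rw [pv_filter_singleton _ hnodup "contiguity"]
    rw [pv_filter_singleton _ hnodup "validity"]
    rw [pv_filter_singleton _ hnodup "times"]
    have hext := pvNew_append numeric_cols (pvPreferred.filter (fun col => numeric_cols.contains col)) []
    rw [List.append_nil] at hext
    have hmem : ∀ x : String, x ∈ pvNew [] numeric_cols ↔ x ∈ numeric_cols := by
      intro x
      rw [← pv_dedup_eq]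
      exact PySem.List.mem_dedup ..
    rw [hext, List.filter_congr hcong, pv_dedup_eq, pv_filter_flatten]
    simp [pvPreferred, hmem, List.append_assoc]
  simp only [default_pareto_axes, default_pareto_axes_alt]
  rw [hkey]

-- ===== VERDICT (by name: the statement is the Claim_ definition above) =====
theorem default_pareto_axes_spec : Claim_equal_default_pareto_axes := by
  intro numeric_cols _ _
  unfold Spec_default_pareto_axes
  exact default_pareto_axes_eq_lists numeric_cols
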